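-- pv_equiv track=rewrite | github.com/GitMonsters/octotetrahedral-agi | arc-puzzle-catalog/re-arc/solves/4132027e/solver.py | transform
-- ===== SOURCE A (Python) =====
-- from collections import Counter
--
-- def transform(input_grid: list[list[int]]) -> list[list[int]]:
--     grid = [row[:] for row in input_grid]
--     H = len(grid)
--     W = len(grid[0])
--
--     def find_period_1d(seq: list[int]) -> int:
--         n = len(seq)
--         for p in range(1, n):
--             if all(seq[i] == seq[i + p] for i in range(n - p)):
--                 return p
--         return n
--
--     def most_common_period(periods: list[int], max_val: int) -> int:
--         count = Counter(periods)
--         # Prefer non-trivial periods (> 1 and < max_val)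
--         candidates = {k: v for k, v in count.items() if 1 < k < max_val}
--         if candidates:
--             return min(candidates, key=lambda k: (-candidates[k], k))
--         if 1 in count:
--             return 1
--         return max_val
--
--     # Column period: find period of each row, take most common non-trivial
--     row_periods = [find_period_1d(grid[r]) for r in range(H)]
--     cp = most_common_period(row_periods, W)
--
--     # Row period: find period of each column, take most common non-trivial
--     col_data = [[grid[r][c] for r in range(H)] for c in range(W)]
--     col_periods = [find_period_1d(col_data[c]) for c in range(W)]
--     rp = most_common_period(col_periods, H)
--
--     # Reconstruct tile via majority voting
--     tile = [[0] * cp for _ in range(rp)]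
--     for tr in range(rp):
--         for tc in range(cp):
--             counts: dict[int, int] = {}
--             for r in range(tr, H, rp):
--                 for c in range(tc, W, cp):
--                     v = grid[r][c]
--                     counts[v] = counts.get(v, 0) + 1
--             tile[tr][tc] = max(counts, key=counts.get)
--
--     # Find bounding box of cells that differ from the tile pattern
--     min_r, max_r = H, -1
--     min_c, max_c = W, -1
--     for r in range(H):
--         for c in range(W):
--             if grid[r][c] != tile[r % rp][c % cp]:
--                 min_r = min(min_r, r)
--                 max_r = max(max_r, r)
--                 min_c = min(min_c, c)
--                 max_c = max(max_c, c)
--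
--     if max_r == -1:
--         return grid
--
--     # Output the correct tile values for the anomaly rectangle
--     return [
--         [tile[r % rp][c % cp] for c in range(min_c, max_c + 1)]
--         for r in range(min_r, max_r + 1)
--     ]
-- ===== SOURCE B (Python) =====
-- from collections import Counter
--
-- def transform(input_grid: list[list[int]]) -> list[list[int]]:
--     grid = [row[:] for row in input_grid]
--     H = len(grid)
--     W = len(grid[0])
--
--     def min_period(seq: list[int]) -> int:
--         # smallest period in O(n) via the KMP prefix function:
--         # the smallest period is n minus the longest proper border.
--         n = len(seq)
--         if n == 0:
--             return 0
--         pi = [0] * n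
--         k = 0
--         for i in range(1, n):
--             while k > 0 and seq[i] != seq[k]:
--                 k = pi[k - 1]
--             if seq[i] == seq[k]:
--                 k += 1
--             pi[i] = k
--         return n - pi[n - 1]
--
--     def pick_period(periods: list[int], max_val: int) -> int:
--         cnt = Counter(periods)
--         cands = [(-v, k) for k, v in cnt.items() if 1 < k < max_val]
--         if cands:
--             return min(cands)[1]
--         return 1 if 1 in cnt else max_val
--
--     cp = pick_period([min_period(row) for row in grid], W)
--     cols = [[grid[r][c] for r in range(H)] for c in range(W)]
--     rp = pick_period([min_period(col) for col in cols], H)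
--
--     def majority(vals: list[int]) -> int:
--         c = Counter(vals)
--         return max(c, key=c.get)
--
--     tile = [
--         [majority([grid[r][c] for r in range(tr, H, rp) for c in range(tc, W, cp)])
--          for tc in range(cp)]
--         for tr in range(rp)
--     ]
--
--     mism = [(r, c) for r in range(H) for c in range(W)
--             if grid[r][c] != tile[r % rp][c % cp]]
--     if not mism:
--         return grid
--     rs = [r for r, _ in mism]
--     cs = [c for _, c in mism]
--     return [
--         [tile[r % rp][c % cp] for c in range(min(cs), max(cs) + 1)]
--         for r in range(min(rs), max(rs) + 1)
--     ]
-- ===== Notes on version B (the rewrite author's own statement) =====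
-- stated objective: alternative
-- what changed: B finds each row/column's smallest period with the KMP prefix function (period = n minus the longest proper border) instead of A's try-every-shift scan, picks the preferred period by one min over (-count, value) pairs instead of a filtered dict with a keyed min, and derives the tile and the anomaly bounding box from comprehensions (Counter majority per residue class, explicit mismatch list) instead of A's in-place mutation loops.
import Mathlib
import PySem

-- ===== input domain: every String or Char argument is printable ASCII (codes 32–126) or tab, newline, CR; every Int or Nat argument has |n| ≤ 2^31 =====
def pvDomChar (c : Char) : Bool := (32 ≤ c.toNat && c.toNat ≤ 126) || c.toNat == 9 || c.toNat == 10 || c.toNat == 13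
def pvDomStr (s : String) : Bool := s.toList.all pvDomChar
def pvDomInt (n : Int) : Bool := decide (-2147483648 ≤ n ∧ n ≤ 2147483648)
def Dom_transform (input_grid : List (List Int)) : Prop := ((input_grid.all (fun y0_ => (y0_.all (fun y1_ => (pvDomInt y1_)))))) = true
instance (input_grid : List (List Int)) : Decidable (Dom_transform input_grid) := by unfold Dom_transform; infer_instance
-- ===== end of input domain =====

-- B computes each row/column's smallest period with the KMP prefix function
-- (smallest period = n minus the longest proper border) instead of A's try-every-shift
-- scan, and restructures the tile vote / bounding box as comprehensions over a
-- mismatch list (objective: alternative algorithm).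

-- ===== PORT A =====
def pvFindPeriod (seq : List Int) : Int :=
  let n : Int := PySem.List.len seq
  (((PySem.List.pyRange 1 n 1).find? (fun p =>
      (PySem.List.pyRange 0 (n - p) 1).all (fun i =>
        PySem.List.pyGetD seq i 0 == PySem.List.pyGetD seq (i + p) 0))).getD n)

def pvMostCommon (periods : List Int) (maxVal : Int) : Int :=
  let count := PySem.Dict.counter periods
  let cand := count.items.foldl (fun d kv =>
      if 1 < kv.1 ∧ kv.1 < maxVal then d.insert kv.1 kv.2 else d) PySem.Dict.empty
  if cand.items ≠ [] then
    (PySem.List.min2? cand.keys (fun k => -(cand.getD k 0)) (fun k => k)).getD 0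
  else if count.contains 1 then (1 : Int) else maxVal

def transform (input_grid : List (List Int)) : List (List Int) :=
  let grid := input_grid.map (fun row => PySem.List.slice row none none)
  let H : Int := PySem.List.len grid
  let W : Int := PySem.List.len (PySem.List.pyGetD grid 0 [])
  let rowPeriods := (PySem.List.pyRange 0 H 1).map (fun r =>
      pvFindPeriod (PySem.List.pyGetD grid r []))
  let cp := pvMostCommon rowPeriods W
  let colData := (PySem.List.pyRange 0 W 1).map (fun c =>
      (PySem.List.pyRange 0 H 1).map (fun r =>
        PySem.List.pyGetD (PySem.List.pyGetD grid r []) c 0))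
  let colPeriods := (PySem.List.pyRange 0 W 1).map (fun c =>
      pvFindPeriod (PySem.List.pyGetD colData c []))
  let rp := pvMostCommon colPeriods H
  let tile0 := (PySem.List.pyRange 0 rp 1).map (fun _ => PySem.List.pyRepeat [(0 : Int)] cp)
  let tile := (PySem.List.pyRange 0 rp 1).foldl (fun tile tr =>
      (PySem.List.pyRange 0 cp 1).foldl (fun tile tc =>
        let counts := (PySem.List.pyRange tr H rp).foldl (fun d r =>
            (PySem.List.pyRange tc W cp).foldl (fun d c =>
              let v := PySem.List.pyGetD (PySem.List.pyGetD grid r []) c 0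
              d.insert v (d.getD v 0 + 1)) d) (PySem.Dict.empty : PySem.Dict Int Int)
        PySem.List.pySetD tile tr (PySem.List.pySetD (PySem.List.pyGetD tile tr []) tc
          ((PySem.List.max? counts.keys (fun k => counts.getD k 0)).getD 0))) tile) tile0
  let bbox := (PySem.List.pyRange 0 H 1).foldl (fun st r =>
      (PySem.List.pyRange 0 W 1).foldl (fun st c =>
        if PySem.List.pyGetD (PySem.List.pyGetD grid r []) c 0 ≠
           PySem.List.pyGetD (PySem.List.pyGetD tile (PySem.Int.mod r rp) []) (PySem.Int.mod c cp) 0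
        then (min st.1 r, max st.2.1 r, min st.2.2.1 c, max st.2.2.2 c)
        else st) st) (H, -1, W, -1)
  if bbox.2.1 = -1 then grid
  else (PySem.List.pyRange bbox.1 (bbox.2.1 + 1) 1).map (fun r =>
        (PySem.List.pyRange bbox.2.2.1 (bbox.2.2.2 + 1) 1).map (fun c =>
          PySem.List.pyGetD (PySem.List.pyGetD tile (PySem.Int.mod r rp) []) (PySem.Int.mod c cp) 0))

-- ===== PORT B =====
-- the KMP while-loop: fuel is the entry value of k (k strictly decreases, so it never runs out)
def pvChase (seq : List Int) (pis : List Nat) (c : Int) : Nat → Nat → Nat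
  | 0, k => k
  | fuel + 1, k =>
    if 0 < k ∧ ¬ c = seq.getD k 0 then pvChase seq pis c fuel (pis.getD (k - 1) 0) else k

def pvKmpStep (seq : List Int) (st : List Nat × Nat) (j : Nat) : List Nat × Nat :=
  let i := j + 1
  let k := pvChase seq st.1 (seq.getD i 0) st.2 st.2
  let k' := if seq.getD i 0 = seq.getD k 0 then k + 1 else k
  (st.1 ++ [k'], k')

def pvMinPeriod (seq : List Int) : Int :=
  if seq.length = 0 then 0
  else
    let st := (List.range (seq.length - 1)).foldl (pvKmpStep seq) ([0], 0)
    (seq.length : Int) - (st.2 : Int)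

def pvPick (periods : List Int) (maxVal : Int) : Int :=
  let cnt := PySem.Dict.counter periods
  let cands := (cnt.items.filter (fun kv => decide (1 < kv.1 ∧ kv.1 < maxVal))).map
      (fun kv => (-kv.2, kv.1))
  if cands ≠ [] then
    ((PySem.List.min2? cands (fun t => t.1) (fun t => t.2)).getD (0, 0)).2
  else if cnt.contains 1 then (1 : Int) else maxVal

def pvMajority (vals : List Int) : Int :=
  let c := PySem.Dict.counter vals
  (PySem.List.max? c.keys (fun k => c.getD k 0)).getD 0

def transform_alt (input_grid : List (List Int)) : List (List Int) :=
  let grid := input_grid.map (fun row => PySem.List.slice row none none)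
  let H : Int := PySem.List.len grid
  let W : Int := PySem.List.len (PySem.List.pyGetD grid 0 [])
  let cp := pvPick (grid.map pvMinPeriod) W
  let cols := (PySem.List.pyRange 0 W 1).map (fun c =>
      (PySem.List.pyRange 0 H 1).map (fun r =>
        PySem.List.pyGetD (PySem.List.pyGetD grid r []) c 0))
  let rp := pvPick (cols.map pvMinPeriod) H
  let tile := (PySem.List.pyRange 0 rp 1).map (fun tr =>
      (PySem.List.pyRange 0 cp 1).map (fun tc =>
        pvMajority ((PySem.List.pyRange tr H rp).flatMap (fun r =>
          (PySem.List.pyRange tc W cp).map (fun c =>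
            PySem.List.pyGetD (PySem.List.pyGetD grid r []) c 0)))))
  let mism := (PySem.List.pyRange 0 H 1).flatMap (fun r =>
      ((PySem.List.pyRange 0 W 1).filter (fun c =>
        decide (PySem.List.pyGetD (PySem.List.pyGetD grid r []) c 0 ≠
          PySem.List.pyGetD (PySem.List.pyGetD tile (PySem.Int.mod r rp) []) (PySem.Int.mod c cp) 0))).map
        (fun c => (r, c)))
  if mism = [] then grid
  else
    let rs := mism.map (fun p => p.1)
    let cs := mism.map (fun p => p.2)
    (PySem.List.pyRange ((PySem.List.min? rs (fun x => x)).getD 0)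
        (((PySem.List.max? rs (fun x => x)).getD 0) + 1) 1).map (fun r =>
      (PySem.List.pyRange ((PySem.List.min? cs (fun x => x)).getD 0)
          (((PySem.List.max? cs (fun x => x)).getD 0) + 1) 1).map (fun c =>
        PySem.List.pyGetD (PySem.List.pyGetD tile (PySem.Int.mod r rp) []) (PySem.Int.mod c cp) 0))

-- ===== PRECONDITION & SPEC =====
-- Pre_ excludes exactly the inputs where the Python A raises: the empty grid and rows
-- shorter than the first row (IndexError), and — when the first row is empty — grids
-- with a nonempty constant row (A then takes max() of an empty counter: ValueError).
def Pre_transform (input_grid : List (List Int)) : Prop :=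
  input_grid ≠ [] ∧
    (∀ row ∈ input_grid, (input_grid.headD []).length ≤ row.length) ∧
    ((input_grid.headD []).length = 0 →
      ∀ row ∈ input_grid, row = [] ∨ ¬ (∀ x ∈ row, x = row.headD 0))
instance (input_grid : List (List Int)) : Decidable (Pre_transform input_grid) := by
  unfold Pre_transform; infer_instance
def pvWitness_transform : List (List Int) := [[1, 1], [1, 2]]
def Spec_transform (input_grid : List (List Int)) (out : List (List Int)) : Prop :=
  out = transform_alt input_grid
instance (input_grid : List (List Int)) (out : List (List Int)) : Decidable (Spec_transform input_grid out) := by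
  unfold Spec_transform; infer_instance

-- ===== CLAIM (what is proved, stated in full; the proofs are below) =====
def Claim_equal_transform : Prop := ∀ (input_grid : List (List Int)), Dom_transform input_grid → Pre_transform input_grid → Spec_transform input_grid (transform input_grid)

-- ===== LEMMAS AND PROOFS =====

-- ---- the period theorem: A's smallest-shift scan = n minus KMP's longest proper border ----

-- borders of the length-i prefix of seq, stated index-wise over List.getD
def pvS (seq : List Int) (j : Nat) : Int := seq.getD j 0

def pvBrd (seq : List Int) (i b : Nat) : Prop :=
  b ≤ i ∧ ∀ j, j < b → pvS seq j = pvS seq (j + (i - b))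

def pvIsMax (seq : List Int) (i b : Nat) : Prop :=
  pvBrd seq i b ∧ b < i ∧ ∀ b', pvBrd seq i b' → b' < i → b' ≤ b

lemma pvBrd_zero (seq : List Int) (i : Nat) : pvBrd seq i 0 :=
  ⟨Nat.zero_le _, fun j hj => absurd hj (by omega)⟩

lemma pvBrd_trans {seq : List Int} {i c b : Nat} (hbc : b ≤ c)
    (h1 : pvBrd seq i c) (h2 : pvBrd seq c b) : pvBrd seq i b := by
  obtain ⟨hc, h1⟩ := h1
  obtain ⟨hb, h2⟩ := h2
  refine ⟨le_trans hbc hc, fun j hj => ?_⟩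
  have e1 : pvS seq j = pvS seq (j + (c - b)) := h2 j hj
  have e2 : pvS seq (j + (c - b)) = pvS seq (j + (c - b) + (i - c)) := h1 _ (by omega)
  have e3 : j + (c - b) + (i - c) = j + (i - b) := by omega
  rw [e1, e2, e3]

lemma pvBrd_of_brd {seq : List Int} {i c b : Nat}
    (h1 : pvBrd seq i c) (h2 : pvBrd seq i b) (hbc : b ≤ c) : pvBrd seq c b := by
  obtain ⟨hc, h1⟩ := h1
  obtain ⟨hb, h2⟩ := h2
  refine ⟨hbc, fun j hj => ?_⟩
  have e2 : pvS seq (j + (c - b)) = pvS seq (j + (c - b) + (i - c)) := h1 _ (by omega)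
  have e1 : pvS seq j = pvS seq (j + (i - b)) := h2 j hj
  have e3 : j + (c - b) + (i - c) = j + (i - b) := by omega
  rw [e2, e3, ← e1]

lemma pvBrd_succ_iff {seq : List Int} {i b : Nat} :
    pvBrd seq (i + 1) (b + 1) ↔ pvBrd seq i b ∧ pvS seq b = pvS seq i := by
  constructor
  · rintro ⟨hle, h⟩
    have hbi : b ≤ i := by omega
    refine ⟨⟨hbi, fun j hj => ?_⟩, ?_⟩
    · have := h j (by omega)
      have e : i + 1 - (b + 1) = i - b := by omega
      rwa [e] at this
    · have := h b (by omega)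
      have e : b + (i + 1 - (b + 1)) = i := by omega
      rwa [e] at this
  · rintro ⟨⟨hbi, h⟩, hsb⟩
    refine ⟨by omega, fun j hj => ?_⟩
    have e : i + 1 - (b + 1) = i - b := by omega
    rw [e]
    rcases Nat.lt_or_ge j b with hjb | hjb
    · exact h j hjb
    · have : j = b := by omega
      subst this
      have e2 : j + (i - j) = i := by omega
      rw [e2]; exact hsb

lemma pvChase_spec (seq : List Int) (pis : List Nat) (c : Int) (i : Nat)
    (hpis : ∀ j, j < pis.length → pvIsMax seq (j + 1) (pis.getD j 0)) :
    ∀ fuel k, k ≤ fuel → k < i → k ≤ pis.length → pvBrd seq i k →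
      pvBrd seq i (pvChase seq pis c fuel k) ∧ pvChase seq pis c fuel k ≤ k ∧
      (∀ b, pvBrd seq i b → b ≤ k → pvS seq b = c → b ≤ pvChase seq pis c fuel k) ∧
      (0 < pvChase seq pis c fuel k → pvS seq (pvChase seq pis c fuel k) = c) := by
  intro fuel
  induction fuel with
  | zero =>
    intro k hk _ _ hbrd
    interval_cases k
    simp only [pvChase]
    exact ⟨hbrd, le_refl _, fun b _ hb _ => hb, fun h => absurd h (by omega)⟩
  | succ fuel ih =>
    intro k hk hki hkp hbrd
    simp only [pvChase]
    by_cases hcond : 0 < k ∧ ¬ c = seq.getD k 0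
    · rw [if_pos hcond]
      obtain ⟨hk0, hne⟩ := hcond
      have hklt : k - 1 < pis.length := by omega
      have hmax := hpis (k - 1) hklt
      have ek : k - 1 + 1 = k := by omega
      rw [ek] at hmax
      obtain ⟨hbk, hklt2, hkmax⟩ := hmax
      set k₁ := pis.getD (k - 1) 0 with hk₁
      have hrec := ih k₁ (by omega) (by omega) (by omega)
        (pvBrd_trans (by omega) hbrd hbk)
      refine ⟨hrec.1, le_trans hrec.2.1 (by omega), fun b hb hbk' hsb => ?_, hrec.2.2.2⟩
      have hbne : b ≠ k := by
        intro h; subst h; exact hne (by simpa [pvS] using hsb.symm)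
      have hblt : b < k := by omega
      have : b ≤ k₁ := hkmax b (pvBrd_of_brd hbrd hb (by omega)) hblt
      exact hrec.2.2.1 b hb this hsb
    · rw [if_neg hcond]
      refine ⟨hbrd, le_refl _, fun b _ hb _ => hb, fun hpos => ?_⟩
      simp only [not_and, not_not] at hcond
      exact (hcond hpos).symm

lemma pvGetD_append_lt {l : List Nat} {x : Nat} {j : Nat} (h : j < l.length) :
    (l ++ [x]).getD j 0 = l.getD j 0 := by
  simp [List.getD_eq_getElem?_getD, List.getElem?_append_left h]

lemma pvGetD_append_self {l : List Nat} {x : Nat} :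
    (l ++ [x]).getD l.length 0 = x := by
  simp [List.getD_eq_getElem?_getD]

lemma pvKmp_inv (seq : List Int) : ∀ m : Nat,
    ((List.range m).foldl (pvKmpStep seq) ([0], 0)).1.length = m + 1 ∧
    ((List.range m).foldl (pvKmpStep seq) ([0], 0)).2 =
      ((List.range m).foldl (pvKmpStep seq) ([0], 0)).1.getD m 0 ∧
    (∀ j, j < m + 1 →
      pvIsMax seq (j + 1) (((List.range m).foldl (pvKmpStep seq) ([0], 0)).1.getD j 0)) := by
  intro m
  induction m with
  | zero =>
    simp only [List.range_zero, List.foldl_nil]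
    refine ⟨rfl, rfl, fun j hj => ?_⟩
    interval_cases j
    have e : ([0] : List Nat).getD 0 0 = 0 := rfl
    rw [e]
    exact ⟨pvBrd_zero seq 1, by omega, fun b' hb' h => by omega⟩
  | succ m ih =>
    obtain ⟨hlen, hlast, hmax⟩ := ih
    set st := (List.range m).foldl (pvKmpStep seq) ([0], 0) with hst
    have hfold : (List.range (m + 1)).foldl (pvKmpStep seq) ([0], 0) = pvKmpStep seq st m := by
      rw [List.range_succ, List.foldl_append, List.foldl_cons, List.foldl_nil]
    rw [hfold]
    have hmaxst : pvIsMax seq (m + 1) st.2 := by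
      rw [hlast]; exact hmax m (by omega)
    have hstlt : st.2 < m + 1 := hmaxst.2.1
    set c := seq.getD (m + 1) 0 with hc
    have hpis : ∀ j, j < st.1.length → pvIsMax seq (j + 1) (st.1.getD j 0) := by
      intro j hj; rw [hlen] at hj; exact hmax j hj
    have hspec := pvChase_spec seq st.1 c (m + 1) hpis st.2 st.2 (le_refl _)
      hstlt (by omega) hmaxst.1
    set r := pvChase seq st.1 c st.2 st.2 with hr
    obtain ⟨hbr, hrle, hrmax, hrpos⟩ := hspec
    have hrlt : r < m + 1 := by omega
    have hkmax : ∀ b, pvBrd seq (m + 1) b → b < m + 1 → b ≤ st.2 := hmaxst.2.2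
    have hstep : pvKmpStep seq st m =
        (st.1 ++ [if seq.getD (m + 1) 0 = seq.getD r 0 then r + 1 else r],
         if seq.getD (m + 1) 0 = seq.getD r 0 then r + 1 else r) := rfl
    rw [hstep]
    set k' := if seq.getD (m + 1) 0 = seq.getD r 0 then r + 1 else r with hk'
    have hnew : pvIsMax seq (m + 2) k' := by
      by_cases heq : seq.getD (m + 1) 0 = seq.getD r 0
      · rw [hk', if_pos heq]
        refine ⟨?_, by omega, ?_⟩
        · exact pvBrd_succ_iff.mpr ⟨hbr, by simpa [pvS, hc] using heq.symm⟩
        · intro b' hb' hb'lt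
          match b', hb'lt with
          | 0, _ => omega
          | b + 1, hb'lt =>
            obtain ⟨hbb, hsb⟩ := pvBrd_succ_iff.mp hb'
            have hble : b ≤ st.2 := hkmax b hbb (by omega)
            have : b ≤ r := hrmax b hbb hble (by simpa [pvS, hc] using hsb)
            omega
      · rw [hk', if_neg heq]
        have hr0 : r = 0 := by
          by_contra h
          exact heq (by simpa [pvS, hc] using (hrpos (by omega)).symm)
        rw [hr0]
        refine ⟨pvBrd_zero seq (m + 2), by omega, ?_⟩
        intro b' hb' hb'lt
        match b', hb'lt with
        | 0, _ => omega
        | b + 1, hb'lt =>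
          obtain ⟨hbb, hsb⟩ := pvBrd_succ_iff.mp hb'
          have hble : b ≤ st.2 := hkmax b hbb (by omega)
          have hb0 : b ≤ 0 := by
            have := hrmax b hbb hble (by simpa [pvS, hc] using hsb)
            omega
          interval_cases b
          exact absurd (heq (by rw [hr0]; simpa [pvS, hc] using hsb.symm)) not_false
    refine ⟨by simp [hlen], by rw [← hlen, pvGetD_append_self], fun j hj => ?_⟩
    rcases Nat.lt_or_ge j (m + 1) with hjm | hjm
    · rw [pvGetD_append_lt (by rw [hlen]; omega)]
      exact hmax j hjm
    · have : j = m + 1 := by omega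
      subst this
      have hg : (st.1 ++ [k']).getD (m + 1) 0 = k' := by rw [← hlen, pvGetD_append_self]
      rw [hg]
      exact hnew

-- first-hit characterisation of `find?` over an Int range
lemma pvFind?_pyRange_none (f : Int → Bool) (a b : Int)
    (h : ∀ q, a ≤ q → q < b → f q = false) :
    (PySem.List.pyRange a b 1).find? f = none := by
  rcases Int.lt_or_le a b with hab | hba
  · have hterm : (b - (a + 1)).toNat < (b - a).toNat := by omega
    rw [PySem.List.pyRange_one_cons hab]
    simp only [List.find?]
    rw [h a (le_refl _) hab]
    exact pvFind?_pyRange_none f (a + 1) b (fun q hq hqb => h q (by omega) hqb)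
  · rw [PySem.List.pyRange_one_eq_nil hba]; rfl
termination_by (b - a).toNat

lemma pvFind?_pyRange_first (f : Int → Bool) (a b p : Int) (hap : a ≤ p) (hpb : p < b)
    (hp : f p = true) (hmin : ∀ q, a ≤ q → q < p → f q = false) :
    (PySem.List.pyRange a b 1).find? f = some p := by
  have hab : a < b := by omega
  rw [PySem.List.pyRange_one_cons hab]
  simp only [List.find?]
  rcases eq_or_lt_of_le hap with heq | hlt
  · subst heq; rw [hp]
  · have hterm : (b - (a + 1)).toNat < (b - a).toNat := by omega
    rw [hmin a (le_refl _) hlt]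
    exact pvFind?_pyRange_first f (a + 1) b p (by omega) hpb hp
      (fun q hq hqp => hmin q (by omega) hqp)
termination_by (b - a).toNat

-- the check in A's scan holds for shift p exactly when n - p is a border
lemma pvCheck_iff (seq : List Int) (p : Nat) (hp1 : 1 ≤ p) (hpn : p < seq.length) :
    ((PySem.List.pyRange 0 ((seq.length : Int) - (p : Int)) 1).all (fun i =>
        PySem.List.pyGetD seq i 0 == PySem.List.pyGetD seq (i + (p : Int)) 0)) = true ↔
      pvBrd seq seq.length (seq.length - p) := by
  rw [List.all_eq_true]
  constructor
  · intro h
    refine ⟨by omega, fun j hj => ?_⟩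
    have hmem : (j : Int) ∈ PySem.List.pyRange 0 ((seq.length : Int) - (p : Int)) 1 := by
      rw [PySem.List.mem_pyRange_one]; omega
    have := h _ hmem
    rw [beq_iff_eq] at this
    have e1 : PySem.List.pyGetD seq (j : Int) 0 = pvS seq j := by
      rw [PySem.List.pyGetD_natCast]
      simp [pvS, List.getD_eq_getElem?_getD]
    have e2 : PySem.List.pyGetD seq ((j : Int) + (p : Int)) 0 = pvS seq (j + p) := by
      rw [show ((j : Int) + (p : Int)) = ((j + p : Nat) : Int) by push_cast; ring,
        PySem.List.pyGetD_natCast]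
      simp [pvS, List.getD_eq_getElem?_getD]
    rw [e1, e2] at this
    have e3 : seq.length - (seq.length - p) = p := by omega
    rw [e3]
    exact this
  · rintro ⟨_, h⟩ i hi
    rw [PySem.List.mem_pyRange_one] at hi
    obtain ⟨j, rfl⟩ : ∃ j : Nat, i = (j : Int) := ⟨i.toNat, by omega⟩
    rw [beq_iff_eq]
    have hj : j < seq.length - p := by omega
    have := h j (by omega)
    have e3 : seq.length - (seq.length - p) = p := by omega
    rw [e3] at this
    have e1 : PySem.List.pyGetD seq (j : Int) 0 = pvS seq j := by
      rw [PySem.List.pyGetD_natCast]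
      simp [pvS, List.getD_eq_getElem?_getD]
    have e2 : PySem.List.pyGetD seq ((j : Int) + (p : Int)) 0 = pvS seq (j + p) := by
      rw [show ((j : Int) + (p : Int)) = ((j + p : Nat) : Int) by push_cast; ring,
        PySem.List.pyGetD_natCast]
      simp [pvS, List.getD_eq_getElem?_getD]
    rw [e1, e2]
    exact this

theorem pvFindPeriod_eq (seq : List Int) : pvFindPeriod seq = pvMinPeriod seq := by
  rcases Nat.eq_zero_or_pos seq.length with hn | hn
  · have hseq : seq = [] := List.length_eq_zero_iff.mp hn
    subst hseq
    simp [pvFindPeriod, pvMinPeriod, PySem.List.len, PySem.List.pyRange_one_eq_nil]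
  · -- n ≥ 1 : use the KMP invariant at m = n - 1
    obtain ⟨hlen, hlast, hmax⟩ := pvKmp_inv seq (seq.length - 1)
    set st := (List.range (seq.length - 1)).foldl (pvKmpStep seq) ([0], 0) with hst
    have hnm : seq.length - 1 + 1 = seq.length := by omega
    have hmaxn : pvIsMax seq seq.length st.2 := by
      rw [hlast]
      have := hmax (seq.length - 1) (by omega)
      rwa [hnm] at this
    set mb := st.2 with hmb
    have hmblt : mb < seq.length := hmaxn.2.1
    have hB : pvMinPeriod seq = (seq.length : Int) - (mb : Int) := by
      rw [pvMinPeriod, if_neg (by omega)]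
    rw [hB]
    rw [pvFindPeriod]
    simp only [PySem.List.len_eq]
    have hchk : ∀ q : Int, 1 ≤ q → q < (seq.length : Int) →
        ((PySem.List.pyRange 0 ((seq.length : Int) - q) 1).all (fun i =>
          PySem.List.pyGetD seq i 0 == PySem.List.pyGetD seq (i + q) 0) = true ↔
          pvBrd seq seq.length (seq.length - q.toNat)) := by
      intro q h1 h2
      have : q = ((q.toNat : Nat) : Int) := by omega
      rw [this]
      exact pvCheck_iff seq q.toNat (by omega) (by omega)
    have hfalse : ∀ q : Int, 1 ≤ q → q < (seq.length : Int) - (mb : Int) →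
        ((PySem.List.pyRange 0 ((seq.length : Int) - q) 1).all (fun i =>
          PySem.List.pyGetD seq i 0 == PySem.List.pyGetD seq (i + q) 0)) = false := by
      intro q h1 h2
      have hnb : ¬ pvBrd seq seq.length (seq.length - q.toNat) := by
        intro hb
        have := hmaxn.2.2 _ hb (by omega)
        omega
      cases hx : ((PySem.List.pyRange 0 ((seq.length : Int) - q) 1).all (fun i =>
          PySem.List.pyGetD seq i 0 == PySem.List.pyGetD seq (i + q) 0)) with
      | false => rfl
      | true => exact absurd ((hchk q h1 (by omega)).mp hx) hnb
    rcases Nat.eq_zero_or_pos mb with hmb0 | hmbpos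
    · -- no non-trivial border: the scan finds nothing and falls back to n
      rw [pvFind?_pyRange_none _ _ _ (fun q h1 h2 => hfalse q h1 (by omega))]
      simp [hmb0]
    · -- the scan's first hit is exactly n - mb
      rw [pvFind?_pyRange_first _ _ _ ((seq.length : Int) - (mb : Int)) (by omega) (by omega)
        ?_ (fun q h1 h2 => hfalse q h1 (by omega))]
      · rfl
      · have h1 : (1 : Int) ≤ (seq.length : Int) - (mb : Int) := by omega
        have h2 : (seq.length : Int) - (mb : Int) < (seq.length : Int) := by omega
        rw [hchk _ h1 h2]
        have e : seq.length - ((seq.length : Int) - (mb : Int)).toNat = mb := by omega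
        rw [e]
        exact hmaxn.1

-- ---- the period-choice theorem: filtered dict + keyed min = min over (-count, k) pairs ----

lemma pvMin2?_map {α β : Type} (f : α → β) (g : β → Int) (h : β → Int) (l : List α) :
    ∀ acc : Option α,
      List.foldl (fun acc x =>
        match acc with
        | none => some x
        | some m => if (decide (g x < g m) || !decide (g m < g x) && decide (h x < h m)) = true
            then some x else some m) (Option.map f acc) (l.map f) =
      Option.map f (List.foldl (fun acc x =>
        match acc with
        | none => some x
        | some m => if (decide (g (f x) < g (f m)) ||
              !decide (g (f m) < g (f x)) && decide (h (f x) < h (f m))) = true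
            then some x else some m) acc l) := by
  induction l with
  | nil => intro acc; rfl
  | cons x t ih =>
    intro acc
    cases acc with
    | none => exact ih (some x)
    | some m =>
      simp only [List.map_cons, List.foldl_cons, Option.map_some]
      by_cases hc : (decide (g (f x) < g (f m)) ||
          !decide (g (f m) < g (f x)) && decide (h (f x) < h (f m))) = true
      · rw [if_pos hc, if_pos hc]; exact ih (some x)
      · rw [if_neg hc, if_neg hc]; exact ih (some m)

lemma pvMin2?_congr {α : Type} (g g' h h' : α → Int) (l : List α)
    (hg : ∀ x ∈ l, g x = g' x) (hh : ∀ x ∈ l, h x = h' x) :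
    ∀ acc : Option α, (∀ m, acc = some m → g m = g' m ∧ h m = h' m) →
      List.foldl (fun acc x =>
        match acc with
        | none => some x
        | some m => if (decide (g x < g m) || !decide (g m < g x) && decide (h x < h m)) = true
            then some x else some m) acc l =
      List.foldl (fun acc x =>
        match acc with
        | none => some x
        | some m => if (decide (g' x < g' m) || !decide (g' m < g' x) && decide (h' x < h' m)) = true
            then some x else some m) acc l := by
  induction l with
  | nil => intro acc _; rfl
  | cons x t ih =>
    intro acc hacc
    have hx : g x = g' x ∧ h x = h' x :=
      ⟨hg x (List.mem_cons_self), hh x (List.mem_cons_self)⟩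
    have hg' : ∀ y ∈ t, g y = g' y := fun y hy => hg y (List.mem_cons_of_mem _ hy)
    have hh' : ∀ y ∈ t, h y = h' y := fun y hy => hh y (List.mem_cons_of_mem _ hy)
    cases acc with
    | none =>
      simp only [List.foldl_cons]
      exact ih hg' hh' (some x) (fun m hm => by cases hm; exact hx)
    | some m =>
      have hm := (hacc m rfl)
      simp only [List.foldl_cons]
      rw [show (decide (g x < g m) || !decide (g m < g x) && decide (h x < h m)) =
          (decide (g' x < g' m) || !decide (g' m < g' x) && decide (h' x < h' m)) by
        rw [hx.1, hx.2, hm.1, hm.2]]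
      by_cases hc : (decide (g' x < g' m) || !decide (g' m < g' x) && decide (h' x < h' m)) = true
      · rw [if_pos hc]
        exact ih hg' hh' (some x) (fun m' hm' => by cases hm'; exact hx)
      · rw [if_neg hc]
        exact ih hg' hh' (some m) (fun m' hm' => by cases hm'; exact hm)

lemma pvMin2?_ne_none {α : Type} (g h : α → Int) (x : α) (l : List α) :
    ∃ m, PySem.List.min2? (x :: l) g h = some m := by
  have : ∀ (t : List α) (m0 : α),
      ∃ m, List.foldl (fun acc y =>
        match acc with
        | none => some y
        | some m => if (decide (g y < g m) || !decide (g m < g y) && decide (h y < h m)) = true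
            then some y else some m) (some m0) t = some m := by
    intro t
    induction t with
    | nil => exact fun m0 => ⟨m0, rfl⟩
    | cons y t ih =>
      intro m0
      simp only [List.foldl_cons]
      by_cases hc : (decide (g y < g m0) || !decide (g m0 < g y) && decide (h y < h m0)) = true
      · rw [if_pos hc]; exact ih y
      · rw [if_neg hc]; exact ih m0
  exact this l x

set_option maxHeartbeats 2000000 in
lemma pvMin2?_map' {α β : Type} (f : α → β) (g : β → Int) (h : β → Int) (l : List α) :
    PySem.List.min2? (l.map f) g h =
      Option.map f (PySem.List.min2? l (fun x => g (f x)) (fun x => h (f x))) := by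
  rw [PySem.List.min2?, PySem.List.min2?]
  exact pvMin2?_map f g h l none

lemma pvMin2?_congr' {α : Type} (l : List α) (g g' h h' : α → Int)
    (hg : ∀ x ∈ l, g x = g' x) (hh : ∀ x ∈ l, h x = h' x) :
    PySem.List.min2? l g h = PySem.List.min2? l g' h' := by
  rw [PySem.List.min2?, PySem.List.min2?]
  exact pvMin2?_congr g g' h h' l hg hh none (by simp)

lemma pvMin2?_ne_none' {α : Type} (g h : α → Int) (l : List α) (hl : l ≠ []) :
    ∃ m, PySem.List.min2? l g h = some m := by
  obtain ⟨x, t, rfl⟩ := List.exists_cons_of_ne_nil hl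
  exact pvMin2?_ne_none g h x t

theorem pvMostCommon_eq (periods : List Int) (maxVal : Int) :
    pvMostCommon periods maxVal = pvPick periods maxVal := by
  rw [pvMostCommon, pvPick]
  set cnt := PySem.Dict.counter periods with hcnt
  set ps := cnt.items.filter (fun kv => decide (1 < kv.1 ∧ kv.1 < maxVal)) with hps
  have hfold : cnt.items.foldl (fun d kv =>
      if 1 < kv.1 ∧ kv.1 < maxVal then d.insert kv.1 kv.2 else d) PySem.Dict.empty =
      ps.foldl (fun d kv => d.insert kv.1 kv.2) PySem.Dict.empty := by
    rw [PySem.List.foldl_ite_eq_foldl_filter]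
  have hkeysnd : (cnt.items.map Prod.fst).Nodup := PySem.Dict.nodup_keys_counter periods
  have hpsnd : (ps.map Prod.fst).Nodup :=
    hkeysnd.sublist (List.filter_sublist.map Prod.fst)
  have hitems : (ps.foldl (fun d kv => d.insert kv.1 kv.2) PySem.Dict.empty).items = ps := by
    rw [PySem.Dict.items_foldl_insert_fresh ps Prod.fst Prod.snd PySem.Dict.empty
      (fun a _ => PySem.Dict.contains_empty _) hpsnd]
    simp [PySem.Dict.empty]
  set cand := ps.foldl (fun d kv => d.insert kv.1 kv.2) PySem.Dict.empty with hcand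
  rw [hfold]
  have hckeys : cand.keys = ps.map Prod.fst := by
    show cand.items.map Prod.fst = _
    rw [hitems]
  have hcknd : cand.keys.Nodup := by rw [hckeys]; exact hpsnd
  have hgetD : ∀ kv ∈ ps, cand.getD kv.1 0 = kv.2 := by
    intro kv hkv
    exact PySem.Dict.getD_of_mem_items cand (by rw [hitems]; exact (Prod.mk.eta ▸ hkv)) hcknd 0
  clear_value cnt ps cand
  by_cases hne : ps ≠ []
  · have h1 : cand.items ≠ [] := by rw [hitems]; exact hne
    have h2 : ps.map (fun kv => ((-kv.2 : Int), kv.1)) ≠ [] := by simpa using hne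
    rw [if_pos h1, if_pos h2]
    rw [hckeys]
    rw [pvMin2?_map' Prod.fst (fun k => -(cand.getD k 0)) (fun k => k) ps]
    rw [pvMin2?_congr' ps _ (fun kv => (-kv.2 : Int)) _ (fun kv => kv.1)
      (fun kv hkv => by show -(cand.getD kv.1 0) = -kv.2; rw [hgetD kv hkv])
      (fun kv _ => rfl)]
    rw [pvMin2?_map' (fun kv => ((-kv.2 : Int), kv.1)) (fun t => t.1) (fun t => t.2) ps]
    rw [pvMin2?_congr' ps _ (fun kv => (-kv.2 : Int)) _ (fun kv => kv.1)
      (fun kv _ => rfl) (fun kv _ => rfl)]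
    obtain ⟨m, hm⟩ := pvMin2?_ne_none' (fun kv : Int × Int => (-kv.2 : Int))
      (fun kv : Int × Int => kv.1) ps hne
    rw [hm]
    rfl
  · rw [not_ne_iff] at hne
    have h1 : ¬ (cand.items ≠ []) := by rw [hitems, hne]; simp
    have h2 : ¬ (ps.map (fun kv => ((-kv.2 : Int), kv.1)) ≠ []) := by rw [hne]; simp
    rw [if_neg h1, if_neg h2]

-- ---- assembling the whole pipeline ----

lemma pvMapRowPeriods (g : List (List Int)) :
    (PySem.List.pyRange 0 (PySem.List.len g) 1).map (fun r =>
      pvFindPeriod (PySem.List.pyGetD g r [])) = g.map pvMinPeriod := by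
  have h1 : (PySem.List.pyRange 0 (PySem.List.len g) 1).map (fun r =>
      pvFindPeriod (PySem.List.pyGetD g r [])) =
      ((PySem.List.pyRange 0 (PySem.List.len g) 1).map (fun r =>
        PySem.List.pyGetD g r [])).map pvFindPeriod := by
    rw [List.map_map]; rfl
  rw [h1, PySem.List.map_pyGetD_pyRange_zero]
  exact List.map_congr_left (fun row _ => pvFindPeriod_eq row)

lemma pvMapColPeriods (f : Int → List Int) (n : Int) :
    (PySem.List.pyRange 0 n 1).map (fun c =>
      pvFindPeriod (PySem.List.pyGetD ((PySem.List.pyRange 0 n 1).map f) c [])) =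
      ((PySem.List.pyRange 0 n 1).map f).map pvMinPeriod := by
  rw [List.map_map]
  refine List.map_congr_left (fun c hc => ?_)
  rw [PySem.List.mem_pyRange_one] at hc
  show pvFindPeriod (PySem.List.pyGetD ((PySem.List.pyRange 0 n 1).map f) c []) = pvMinPeriod (f c)
  rw [PySem.List.pyGetD_map_pyRange_of_nonneg f n c [] hc.1 hc.2, pvFindPeriod_eq]

-- a fold that writes cell j of a row, for j over a range, is a tabulation
lemma pvSetFoldTab {α : Type} (F : Nat → α → α) (d : α) :
    ∀ (l a : Nat) (row : List α), row.length = a + l →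
      (List.range' a l).foldl (fun r j => r.set j (F j (r.getD j d))) row =
        row.take a ++ (List.range' a l).map (fun j => F j (row.getD j d)) := by
  intro l
  induction l with
  | zero =>
    intro a row hlen
    simp only [List.range'_zero, List.foldl_nil, List.map_nil, List.append_nil]
    rw [List.take_of_length_le (by omega)]
  | succ l ih =>
    intro a row hlen
    rw [List.range'_succ, List.foldl_cons, List.map_cons]
    have ha : a < row.length := by omega
    set v := F a (row.getD a d) with hv
    have hlen2 : (row.set a v).length = (a + 1) + l := by simp [hlen]; omega
    rw [ih (a + 1) (row.set a v) hlen2]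
    have htake : (row.set a v).take (a + 1) = row.take a ++ [v] := by
      rw [show row.set a v = row.take a ++ v :: row.drop (a + 1) by
        rw [List.set_eq_take_append_cons_drop, if_pos ha]]
      have h1 : (row.take a).length = a := by rw [List.length_take]; omega
      rw [List.take_append, h1, List.take_take,
        Nat.min_eq_right (by omega), show a + 1 - a = 1 by omega,
        List.take_succ_cons, List.take_zero]
    rw [htake]
    have hmap : (List.range' (a + 1) l).map (fun j => F j ((row.set a v).getD j d)) =
        (List.range' (a + 1) l).map (fun j => F j (row.getD j d)) := by
      refine List.map_congr_left (fun j hj => ?_)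
      rw [List.mem_range'] at hj
      have hne : a ≠ j := by omega
      rw [List.getD_eq_getElem?_getD, List.getD_eq_getElem?_getD, List.getElem?_set_ne hne]
    rw [hmap, List.append_assoc]
    rfl

-- writing into row tr of the matrix over an inner loop = rewriting that row
lemma pvSetFoldRow (tr : Nat) (v : Nat → Int) :
    ∀ (L : List Nat) (tile : List (List Int)),
      L.foldl (fun tile t => tile.set tr ((tile.getD tr []).set t (v t))) tile =
      tile.set tr (L.foldl (fun row t => row.set t (v t)) (tile.getD tr [])) := by
  intro L
  induction L with
  | nil =>
    intro tile
    simp only [List.foldl_nil]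
    by_cases htr : tr < tile.length
    · rw [List.getD_eq_getElem?_getD, List.getElem?_eq_getElem htr]
      show tile = tile.set tr tile[tr]
      rw [List.set_getElem_self htr]
    · rw [List.set_eq_of_length_le (by omega)]
  | cons t L ih =>
    intro tile
    rw [List.foldl_cons, List.foldl_cons, ih]
    by_cases htr : tr < tile.length
    · have hget : (tile.set tr ((tile.getD tr []).set t (v t))).getD tr [] =
          (tile.getD tr []).set t (v t) := by
        rw [List.getD_eq_getElem?_getD, List.getElem?_set_self (by simpa using htr)]
        rfl
      rw [hget, List.set_set]
    · have hid : ∀ x : List Int, tile.set tr x = tile :=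
        fun x => List.set_eq_of_length_le (by omega)
      simp only [hid]

-- A's nested counting loop builds Counter of the flattened residue class
lemma pvCountsEq (rlist clist : List Int) (valfn : Int → Int → Int) :
    rlist.foldl (fun d r => clist.foldl (fun d c =>
        d.insert (valfn r c) (d.getD (valfn r c) 0 + 1)) d) PySem.Dict.empty =
      PySem.Dict.counter (rlist.flatMap (fun r => clist.map (valfn r))) := by
  rw [← PySem.Dict.foldl_insert_getD_add_one_eq_counter, List.foldl_flatMap]
  refine PySem.List.foldl_congr_mem rlist _ _ _ ?_
  intro d r _
  rw [List.foldl_map]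

-- A's mutate-in-place tile build equals B's comprehension tile
lemma pvTileEq (grid : List (List Int)) (H W cp rp : Int) :
    (PySem.List.pyRange 0 rp 1).foldl (fun tile tr =>
      (PySem.List.pyRange 0 cp 1).foldl (fun tile tc =>
        let counts := (PySem.List.pyRange tr H rp).foldl (fun d r =>
            (PySem.List.pyRange tc W cp).foldl (fun d c =>
              let v := PySem.List.pyGetD (PySem.List.pyGetD grid r []) c 0
              d.insert v (d.getD v 0 + 1)) d) (PySem.Dict.empty : PySem.Dict Int Int)
        PySem.List.pySetD tile tr (PySem.List.pySetD (PySem.List.pyGetD tile tr []) tc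
          ((PySem.List.max? counts.keys (fun k => counts.getD k 0)).getD 0))) tile)
      ((PySem.List.pyRange 0 rp 1).map (fun _ => PySem.List.pyRepeat [(0 : Int)] cp)) =
    (PySem.List.pyRange 0 rp 1).map (fun tr => (PySem.List.pyRange 0 cp 1).map (fun tc =>
      pvMajority ((PySem.List.pyRange tr H rp).flatMap (fun r =>
        (PySem.List.pyRange tc W cp).map (fun c =>
          PySem.List.pyGetD (PySem.List.pyGetD grid r []) c 0))))) := by
  -- the cell value A computes is B's majority of the residue class
  have hcell : ∀ tr tc : Int,
      ((PySem.List.max? ((PySem.List.pyRange tr H rp).foldl (fun d r =>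
          (PySem.List.pyRange tc W cp).foldl (fun d c =>
            d.insert (PySem.List.pyGetD (PySem.List.pyGetD grid r []) c 0)
              (d.getD (PySem.List.pyGetD (PySem.List.pyGetD grid r []) c 0) 0 + 1)) d)
          (PySem.Dict.empty : PySem.Dict Int Int)).keys
        (fun k => ((PySem.List.pyRange tr H rp).foldl (fun d r =>
          (PySem.List.pyRange tc W cp).foldl (fun d c =>
            d.insert (PySem.List.pyGetD (PySem.List.pyGetD grid r []) c 0)
              (d.getD (PySem.List.pyGetD (PySem.List.pyGetD grid r []) c 0) 0 + 1)) d)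
          (PySem.Dict.empty : PySem.Dict Int Int)).getD k 0)).getD 0) =
      pvMajority ((PySem.List.pyRange tr H rp).flatMap (fun r =>
        (PySem.List.pyRange tc W cp).map (fun c =>
          PySem.List.pyGetD (PySem.List.pyGetD grid r []) c 0))) := by
    intro tr tc
    have h : ((PySem.List.pyRange tr H rp).foldl (fun d r =>
          (PySem.List.pyRange tc W cp).foldl (fun d c =>
            d.insert (PySem.List.pyGetD (PySem.List.pyGetD grid r []) c 0)
              (d.getD (PySem.List.pyGetD (PySem.List.pyGetD grid r []) c 0) 0 + 1)) d)
          (PySem.Dict.empty : PySem.Dict Int Int)) =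
        PySem.Dict.counter ((PySem.List.pyRange tr H rp).flatMap (fun r =>
          (PySem.List.pyRange tc W cp).map (fun c =>
            PySem.List.pyGetD (PySem.List.pyGetD grid r []) c 0))) :=
      pvCountsEq _ _ (fun r c => PySem.List.pyGetD (PySem.List.pyGetD grid r []) c 0)
    simp only [h]
    rfl
  simp only []
  simp only [hcell]
  rw [PySem.List.pyRange_zero rp, PySem.List.pyRange_zero cp]
  simp only [List.foldl_map, List.map_map, Function.comp_def,
    PySem.List.pySetD_natCast, PySem.List.pyGetD_natCast]
  -- collapse the inner write loop into a row update
  have hrow : ∀ (j : Nat) (tile : List (List Int)),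
      (List.range cp.toNat).foldl (fun tile t =>
        tile.set j ((tile.getD j []).set t (pvMajority ((PySem.List.pyRange (j : Int) H rp).flatMap (fun r =>
          (PySem.List.pyRange (t : Int) W cp).map (fun c =>
            PySem.List.pyGetD (PySem.List.pyGetD grid r []) c 0)))))) tile =
      tile.set j ((List.range cp.toNat).foldl (fun row t =>
        row.set t (pvMajority ((PySem.List.pyRange (j : Int) H rp).flatMap (fun r =>
          (PySem.List.pyRange (t : Int) W cp).map (fun c =>
            PySem.List.pyGetD (PySem.List.pyGetD grid r []) c 0))))) (tile.getD j [])) :=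
    fun j tile => pvSetFoldRow j _ (List.range cp.toNat) tile
  rw [PySem.List.foldl_congr_mem (List.range rp.toNat) _ _ _ (fun tile j _ => hrow j tile)]
  have htab := pvSetFoldTab (fun j row => (List.range cp.toNat).foldl
      (fun row t => row.set t (pvMajority ((PySem.List.pyRange (j : Int) H rp).flatMap (fun r =>
        (PySem.List.pyRange (t : Int) W cp).map (fun c =>
          PySem.List.pyGetD (PySem.List.pyGetD grid r []) c 0))))) row) ([] : List Int)
      rp.toNat 0
      ((List.range rp.toNat).map (fun _ => PySem.List.pyRepeat [(0 : Int)] cp))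
      (by simp)
  rw [← List.range_eq_range'] at htab
  rw [htab]
  simp only [List.take_zero, List.nil_append]
  refine List.map_congr_left (fun j hj => ?_)
  rw [List.mem_range] at hj
  rw [PySem.List.getD_map_range _ _ _ _ hj, PySem.List.pyRepeat_singleton]
  have htab2 := pvSetFoldTab (fun t (_ : Int) =>
      pvMajority ((PySem.List.pyRange (j : Int) H rp).flatMap (fun r =>
        (PySem.List.pyRange (t : Int) W cp).map (fun c =>
          PySem.List.pyGetD (PySem.List.pyGetD grid r []) c 0)))) (0 : Int)
      cp.toNat 0 (List.replicate cp.toNat (0 : Int)) (by simp)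
  rw [← List.range_eq_range'] at htab2
  rw [htab2]
  rfl

-- A's four-accumulator bounding-box sweep = component folds over the mismatch list
lemma pvBboxFold (H W : Int) (P : Int → Int → Prop) [inst : ∀ r c, Decidable (P r c)] :
    (PySem.List.pyRange 0 H 1).foldl (fun st r =>
      (PySem.List.pyRange 0 W 1).foldl (fun st c =>
        if P r c then (min st.1 r, max st.2.1 r, min st.2.2.1 c, max st.2.2.2 c)
        else st) st) ((H, -1, W, -1) : Int × Int × Int × Int) =
    (((PySem.List.pyRange 0 H 1).flatMap (fun r =>
        ((PySem.List.pyRange 0 W 1).filter (fun c => decide (P r c))).map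
          (fun c => (r, c)))).foldl (fun a p => min a p.1) H,
     ((PySem.List.pyRange 0 H 1).flatMap (fun r =>
        ((PySem.List.pyRange 0 W 1).filter (fun c => decide (P r c))).map
          (fun c => (r, c)))).foldl (fun a p => max a p.1) (-1),
     ((PySem.List.pyRange 0 H 1).flatMap (fun r =>
        ((PySem.List.pyRange 0 W 1).filter (fun c => decide (P r c))).map
          (fun c => (r, c)))).foldl (fun a p => min a p.2) W,
     ((PySem.List.pyRange 0 H 1).flatMap (fun r =>
        ((PySem.List.pyRange 0 W 1).filter (fun c => decide (P r c))).map
          (fun c => (r, c)))).foldl (fun a p => max a p.2) (-1)) := by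
  have hinner : ∀ (st : Int × Int × Int × Int) (r : Int),
      (PySem.List.pyRange 0 W 1).foldl (fun st c =>
        if P r c then (min st.1 r, max st.2.1 r, min st.2.2.1 c, max st.2.2.2 c)
        else st) st =
      (((PySem.List.pyRange 0 W 1).filter (fun c => decide (P r c))).map
        (fun c => (r, c))).foldl (fun st p =>
          (min st.1 p.1, max st.2.1 p.1, min st.2.2.1 p.2, max st.2.2.2 p.2)) st := by
    intro st r
    rw [PySem.List.foldl_ite_eq_foldl_filter, List.foldl_map]
  simp only [hinner]
  rw [← List.foldl_flatMap]
  rw [PySem.List.foldl_prod_mk (f := fun a (p : Int × Int) => min a p.1)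
    (g := fun (b : Int × Int × Int) (p : Int × Int) =>
      (max b.1 p.1, min b.2.1 p.2, max b.2.2 p.2))]
  rw [PySem.List.foldl_prod_mk (f := fun a (p : Int × Int) => max a p.1)
    (g := fun (b : Int × Int) (p : Int × Int) => (min b.1 p.2, max b.2 p.2))]
  rw [PySem.List.foldl_prod_mk (f := fun a (p : Int × Int) => min a p.2)
    (g := fun (b : Int) (p : Int × Int) => max b p.2)]

lemma pvMemM {H W : Int} {P : Int → Int → Prop} [inst : ∀ r c, Decidable (P r c)]
    {p : Int × Int}
    (hp : p ∈ (PySem.List.pyRange 0 H 1).flatMap (fun r =>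
      ((PySem.List.pyRange 0 W 1).filter (fun c => decide (P r c))).map
        (fun c => (r, c)))) :
    0 ≤ p.1 ∧ p.1 < H ∧ 0 ≤ p.2 ∧ p.2 < W := by
  simp only [List.mem_flatMap, List.mem_map, List.mem_filter] at hp
  obtain ⟨r, hr, c, ⟨hc, _⟩, rfl⟩ := hp
  rw [PySem.List.mem_pyRange_one] at hr hc
  exact ⟨hr.1, hr.2, hc.1, hc.2⟩

-- ===== VERDICT (by name: the statement is the Claim_ definition above) =====
theorem transform_spec : Claim_equal_transform := by
  intro g _hdom _hpre
  show transform g = transform_alt g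
  simp only [transform, transform_alt]
  have hgrid : g.map (fun row => PySem.List.slice row none none) = g := by
    simp [PySem.List.slice_none_none]
  rw [hgrid]
  rw [pvMapRowPeriods g]
  rw [pvMapColPeriods (fun c => (PySem.List.pyRange 0 (PySem.List.len g) 1).map (fun r =>
      PySem.List.pyGetD (PySem.List.pyGetD g r []) c 0))
      (PySem.List.len (PySem.List.pyGetD g 0 []))]
  simp only [pvMostCommon_eq]
  set H := PySem.List.len g with hH
  set W := PySem.List.len (PySem.List.pyGetD g 0 []) with hWd
  set cp := pvPick (g.map pvMinPeriod) W with hcp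
  set cols := (PySem.List.pyRange 0 W 1).map (fun c =>
      (PySem.List.pyRange 0 H 1).map (fun r =>
        PySem.List.pyGetD (PySem.List.pyGetD g r []) c 0)) with hcols
  set rp := pvPick (cols.map pvMinPeriod) H with hrp
  rw [pvTileEq g H W cp rp]
  set T := (PySem.List.pyRange 0 rp 1).map (fun tr =>
      (PySem.List.pyRange 0 cp 1).map (fun tc =>
        pvMajority ((PySem.List.pyRange tr H rp).flatMap (fun r =>
          (PySem.List.pyRange tc W cp).map (fun c =>
            PySem.List.pyGetD (PySem.List.pyGetD g r []) c 0))))) with hT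
  set M := (PySem.List.pyRange 0 H 1).flatMap (fun r =>
      ((PySem.List.pyRange 0 W 1).filter (fun c =>
        decide (PySem.List.pyGetD (PySem.List.pyGetD g r []) c 0 ≠
          PySem.List.pyGetD (PySem.List.pyGetD T (PySem.Int.mod r rp) [])
            (PySem.Int.mod c cp) 0))).map (fun c => (r, c))) with hM
  have hbb : (PySem.List.pyRange 0 H 1).foldl (fun st r =>
      (PySem.List.pyRange 0 W 1).foldl (fun st c =>
        if PySem.List.pyGetD (PySem.List.pyGetD g r []) c 0 ≠
           PySem.List.pyGetD (PySem.List.pyGetD T (PySem.Int.mod r rp) [])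
             (PySem.Int.mod c cp) 0
        then (min st.1 r, max st.2.1 r, min st.2.2.1 c, max st.2.2.2 c)
        else st) st) ((H, -1, W, -1) : Int × Int × Int × Int) =
      (M.foldl (fun a p => min a p.1) H, M.foldl (fun a p => max a p.1) (-1),
       M.foldl (fun a p => min a p.2) W, M.foldl (fun a p => max a p.2) (-1)) := by
    rw [hM]
    exact pvBboxFold H W (fun r c =>
      PySem.List.pyGetD (PySem.List.pyGetD g r []) c 0 ≠
        PySem.List.pyGetD (PySem.List.pyGetD T (PySem.Int.mod r rp) [])
          (PySem.Int.mod c cp) 0)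
  rw [hbb]
  by_cases hMe : M = []
  · rw [hMe]
    simp
  · obtain ⟨q, t, hqt⟩ := List.exists_cons_of_ne_nil hMe
    have hq : q ∈ M := by rw [hqt]; exact List.mem_cons_self
    have hqb := pvMemM hq
    have hmaxr : (t.foldl (fun a p => max a p.1) q.1) = M.foldl (fun a p => max a p.1) (-1) := by
      rw [hqt, List.foldl_cons, max_eq_right (show (-1 : Int) ≤ q.1 by have := hqb.1; omega)]
    have hmaxne : ¬ (M.foldl (fun a p => max a p.1) (-1) = -1) := by
      rw [← hmaxr]
      have h := PySem.List.le_foldl_max_int t (fun p => p.1) q.1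
      omega
    have hne2 : ¬ (M = []) := hMe
    rw [if_neg ?_, if_neg hne2]
    swap
    · show ¬ ((M.foldl (fun a p => min a p.1) H, M.foldl (fun a p => max a p.1) (-1),
        M.foldl (fun a p => min a p.2) W, M.foldl (fun a p => max a p.2) (-1)).2.1 = -1)
      exact hmaxne
    -- the four bounds coincide
    have e1 : (M.foldl (fun a p => min a p.1) H, M.foldl (fun a p => max a p.1) (-1),
        M.foldl (fun a p => min a p.2) W, M.foldl (fun a p => max a p.2) (-1)).1 =
        (PySem.List.min? (M.map (fun p => p.1)) (fun x => x)).getD 0 := by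
      show M.foldl (fun a p => min a p.1) H = _
      rw [hqt, List.map_cons, PySem.List.min?_id_cons, Option.getD_some,
        List.foldl_cons, min_eq_right (le_of_lt hqb.2.1), List.foldl_map]
    have e2 : (M.foldl (fun a p => min a p.1) H, M.foldl (fun a p => max a p.1) (-1),
        M.foldl (fun a p => min a p.2) W, M.foldl (fun a p => max a p.2) (-1)).2.1 =
        (PySem.List.max? (M.map (fun p => p.1)) (fun x => x)).getD 0 := by
      show M.foldl (fun a p => max a p.1) (-1) = _
      rw [hqt, List.map_cons, PySem.List.max?_id_cons, Option.getD_some,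
        List.foldl_cons, max_eq_right (show (-1 : Int) ≤ q.1 by have := hqb.1; omega),
        List.foldl_map]
    have e3 : (M.foldl (fun a p => min a p.1) H, M.foldl (fun a p => max a p.1) (-1),
        M.foldl (fun a p => min a p.2) W, M.foldl (fun a p => max a p.2) (-1)).2.2.1 =
        (PySem.List.min? (M.map (fun p => p.2)) (fun x => x)).getD 0 := by
      show M.foldl (fun a p => min a p.2) W = _
      rw [hqt, List.map_cons, PySem.List.min?_id_cons, Option.getD_some,
        List.foldl_cons, min_eq_right (le_of_lt hqb.2.2.2), List.foldl_map]
    have e4 : (M.foldl (fun a p => min a p.1) H, M.foldl (fun a p => max a p.1) (-1),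
        M.foldl (fun a p => min a p.2) W, M.foldl (fun a p => max a p.2) (-1)).2.2.2 =
        (PySem.List.max? (M.map (fun p => p.2)) (fun x => x)).getD 0 := by
      show M.foldl (fun a p => max a p.2) (-1) = _
      rw [hqt, List.map_cons, PySem.List.max?_id_cons, Option.getD_some,
        List.foldl_cons, max_eq_right (show (-1 : Int) ≤ q.2 by have := hqb.2.2.1; omega),
        List.foldl_map]
    rw [e1, e2, e3, e4]
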